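-- pv_equiv track=rewrite | github.com/paiml/depyler | examples/hard_graph_patterns.py | count_sink_nodes
-- ===== SOURCE A (Python) =====
-- def all_nodes(graph: dict[int, list[int]]) -> list[int]:
--     """Extract all unique nodes from a graph adjacency list."""
--     node_set: dict[int, int] = {}
--     for node in graph:
--         node_set[node] = 1
--         neighbors: list[int] = graph[node]
--         j: int = 0
--         while j < len(neighbors):
--             node_set[neighbors[j]] = 1
--             j = j + 1
--     result: list[int] = []
--     for n in node_set:
--         result.append(n)
--     return result
--
-- def count_sink_nodes(graph: dict[int, list[int]]) -> int:
--     """Count nodes with out-degree 0 in directed graph."""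
--     nodes: list[int] = all_nodes(graph)
--     count: int = 0
--     ni: int = 0
--     while ni < len(nodes):
--         node: int = nodes[ni]
--         if node not in graph or len(graph[node]) == 0:
--             count = count + 1
--         ni = ni + 1
--     return count
-- ===== SOURCE B (Python) =====
-- def count_sink_nodes(graph: dict[int, list[int]]) -> int:
--     """Count nodes with out-degree 0 in directed graph.
--
--     Total distinct nodes minus the number of keys that have outgoing edges:
--     every distinct node that is not a non-empty source is a sink.
--     """
--     nodes = set(graph)
--     for nbrs in graph.values():
--         nodes.update(nbrs)
--     sources = sum(1 for nbrs in graph.values() if nbrs)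
--     return len(nodes) - sources
-- ===== Notes on version B (the rewrite author's own statement) =====
-- stated objective: simpler
-- what changed: Replaces the explicit dict-as-set node collection and the per-node membership/length branch loop by a set union of keys and all neighbors, returning total-distinct-nodes minus the count of keys with a nonempty adjacency list.
import Mathlib
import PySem

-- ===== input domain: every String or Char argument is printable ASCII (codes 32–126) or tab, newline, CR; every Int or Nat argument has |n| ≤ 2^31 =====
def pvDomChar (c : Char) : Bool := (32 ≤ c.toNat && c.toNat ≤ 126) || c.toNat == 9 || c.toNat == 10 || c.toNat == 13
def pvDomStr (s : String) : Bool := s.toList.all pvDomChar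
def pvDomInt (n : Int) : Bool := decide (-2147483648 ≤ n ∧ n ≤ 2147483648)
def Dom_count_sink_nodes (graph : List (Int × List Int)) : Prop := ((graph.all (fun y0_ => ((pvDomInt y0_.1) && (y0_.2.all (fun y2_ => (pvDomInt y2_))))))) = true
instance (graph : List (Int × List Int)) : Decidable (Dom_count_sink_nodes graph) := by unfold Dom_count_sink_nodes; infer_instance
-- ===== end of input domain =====

-- B replaces A's dict-as-set collection and per-node branch loop by |all distinct nodes| − |keys with outgoing edges| (objective: simpler).

-- ===== PORT A =====
-- iterating the dict and looking each key up ('neighbors = graph[node]') is ported as folding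
-- over the entries themselves; exact because a dict's keys are distinct (Pre_)
def count_sink_nodes (graph : List (Int × List Int)) : Int :=
  let node_set : PySem.Dict Int Int :=
    graph.foldl (fun d p => p.2.foldl (fun d n => d.insert n 1) (d.insert p.1 1)) PySem.Dict.empty
  let nodes : List Int := node_set.keys.foldl (fun r n => r ++ [n]) []
  nodes.foldl (fun c node =>
    if (!(PySem.Dict.mk graph).contains node || ((PySem.Dict.mk graph).getD node []).length == 0)
    then c + 1 else c) 0

-- ===== PORT B =====
def count_sink_nodes_alt (graph : List (Int × List Int)) : Int :=
  let nodes : PySem.Set Int :=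
    graph.foldl (fun s p => PySem.Set.update s p.2) (PySem.Set.ofList (graph.map Prod.fst))
  (nodes.length : Int) - (graph.countP (fun p => !p.2.isEmpty) : Int)

-- ===== PRECONDITION & SPEC =====
-- Pre_: the argument stands for a Python dict, whose keys are necessarily distinct;
-- it excludes only association lists that no Python dict input can produce.
def Pre_count_sink_nodes (graph : List (Int × List Int)) : Prop := (graph.map Prod.fst).Nodup
instance (graph : List (Int × List Int)) : Decidable (Pre_count_sink_nodes graph) := by unfold Pre_count_sink_nodes; infer_instance
def pvWitness_count_sink_nodes : (List (Int × List Int)) := [(0, [1, 2]), (1, []), (3, [0])]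
def Spec_count_sink_nodes (graph : List (Int × List Int)) (out : Int) : Prop := out = count_sink_nodes_alt graph
instance (graph : List (Int × List Int)) (out : Int) : Decidable (Spec_count_sink_nodes graph out) := by unfold Spec_count_sink_nodes; infer_instance

-- ===== CLAIM (what is proved, stated in full; the proofs are below) =====
def Claim_equal_count_sink_nodes : Prop := ∀ (graph : List (Int × List Int)), Dom_count_sink_nodes graph → Pre_count_sink_nodes graph → Spec_count_sink_nodes graph (count_sink_nodes graph)

-- ===== LEMMAS AND PROOFS =====

-- keys of A's node_set dict stay duplicate-free
lemma nodup_keys_insert_fold (ns : List Int) (d : PySem.Dict Int Int) (h : d.keys.Nodup) :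
    (ns.foldl (fun d n => d.insert n 1) d).keys.Nodup := by
  induction ns generalizing d with
  | nil => exact h
  | cons n ns ih => exact ih _ (PySem.Dict.nodup_keys_insert _ _ _ h)

lemma mem_keys_insert_fold (ns : List Int) (d : PySem.Dict Int Int) (x : Int) :
    x ∈ (ns.foldl (fun d n => d.insert n 1) d).keys ↔ x ∈ d.keys ∨ x ∈ ns := by
  induction ns generalizing d with
  | nil => simp
  | cons n ns ih =>
    simp only [List.foldl_cons, ih, PySem.Dict.mem_keys_insert, List.mem_cons]
    tauto

lemma nodup_keys_nodeset_fold (g : List (Int × List Int)) (d : PySem.Dict Int Int) (h : d.keys.Nodup) :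
    (g.foldl (fun d p => p.2.foldl (fun d n => d.insert n 1) (d.insert p.1 1)) d).keys.Nodup := by
  induction g generalizing d with
  | nil => exact h
  | cons p g ih =>
    exact ih _ (nodup_keys_insert_fold _ _ (PySem.Dict.nodup_keys_insert _ _ _ h))

lemma mem_keys_nodeset_fold (g : List (Int × List Int)) (d : PySem.Dict Int Int) (x : Int) :
    x ∈ (g.foldl (fun d p => p.2.foldl (fun d n => d.insert n 1) (d.insert p.1 1)) d).keys ↔
      x ∈ d.keys ∨ ∃ p ∈ g, x = p.1 ∨ x ∈ p.2 := by
  induction g generalizing d with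
  | nil => simp
  | cons p g ih =>
    simp only [List.foldl_cons, ih, mem_keys_insert_fold, PySem.Dict.mem_keys_insert, List.mem_cons]
    constructor
    · rintro ((( h | h) | h) | ⟨q, hq, hx⟩)
      · exact Or.inr ⟨p, Or.inl rfl, Or.inl h⟩
      · exact Or.inl h
      · exact Or.inr ⟨p, Or.inl rfl, Or.inr h⟩
      · exact Or.inr ⟨q, Or.inr hq, hx⟩
    · rintro (h | ⟨q, (h' | hq), hx⟩)
      · exact Or.inl (Or.inl (Or.inr h))
      · subst h'
        rcases hx with h | h
        · exact Or.inl (Or.inl (Or.inl h))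
        · exact Or.inl (Or.inr h)
      · exact Or.inr ⟨q, hq, hx⟩
lemma nodup_set_fold (g : List (Int × List Int)) (s : PySem.Set Int) (h : s.Nodup) :
    (g.foldl (fun s p => PySem.Set.update s p.2) s).Nodup := by
  induction g generalizing s with
  | nil => exact h
  | cons p g ih => exact ih _ (PySem.Set.nodup_update _ _ h)

lemma mem_set_fold (g : List (Int × List Int)) (s : PySem.Set Int) (x : Int) :
    x ∈ g.foldl (fun s p => PySem.Set.update s p.2) s ↔ x ∈ s ∨ ∃ p ∈ g, x ∈ p.2 := by
  induction g generalizing s with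
  | nil => simp
  | cons p g ih =>
    simp only [List.foldl_cons, ih, PySem.Set.mem_update, List.mem_cons]
    constructor
    · rintro ((h | h) | h)
      · exact Or.inl h
      · exact Or.inr ⟨p, Or.inl rfl, h⟩
      · obtain ⟨q, hq, hx⟩ := h; exact Or.inr ⟨q, Or.inr hq, hx⟩
    · rintro (h | ⟨q, (rfl | hq), hx⟩)
      · exact Or.inl (Or.inl h)
      · exact Or.inl (Or.inr hx)
      · exact Or.inr ⟨q, hq, hx⟩

-- every element is counted either as a sink or as a non-sink
lemma countP_add_countP_not_len (L : List Int) (p : Int → Bool) :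
    L.countP p + L.countP (fun x => !p x) = L.length := by
  induction L with
  | nil => simp
  | cons a L ih => by_cases h : p a <;> simp [h] <;> omega

-- counting a predicate supported inside K over a superset list L with no duplicates
lemma countP_eq_of_support {q : Int → Bool} {K L : List Int} (hK : K.Nodup) (hL : L.Nodup)
    (hsub : ∀ x ∈ K, x ∈ L) (hsupp : ∀ x, q x = true → x ∈ K) :
    L.countP q = K.countP q := by
  rw [List.countP_eq_length_filter, List.countP_eq_length_filter]
  refine List.Perm.length_eq ?_
  rw [List.perm_ext_iff_of_nodup (hL.filter _) (hK.filter _)]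
  intro a
  simp only [List.mem_filter]
  exact ⟨fun ⟨_, hq⟩ => ⟨hsupp a hq, hq⟩, fun ⟨ha, hq⟩ => ⟨hsub a ha, hq⟩⟩

-- ===== VERDICT (by name: the statement is the Claim_ definition above) =====
theorem count_sink_nodes_spec : Claim_equal_count_sink_nodes := by
  intro graph _ hpre
  simp only [Spec_count_sink_nodes, count_sink_nodes, count_sink_nodes_alt]
  have hpre' : (graph.map Prod.fst).Nodup := hpre
  set d := PySem.Dict.mk graph with hd
  set qA : Int → Bool := fun node => !d.contains node || (d.getD node []).length == 0 with hqA
  -- A's result-building loop and counting loop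
  rw [PySem.List.foldl_append_singleton]
  rw [PySem.List.foldl_count_if qA]
  simp only [List.nil_append, zero_add]
  set A_keys := (graph.foldl (fun d p => p.2.foldl (fun d n => d.insert n 1) (d.insert p.1 1)) (PySem.Dict.empty : PySem.Dict Int Int)).keys with hA
  set Bs := graph.foldl (fun s p => PySem.Set.update s p.2) (PySem.Set.ofList (graph.map Prod.fst)) with hB
  have hAnodup : A_keys.Nodup := by
    rw [hA]
    exact nodup_keys_nodeset_fold graph PySem.Dict.empty (by simp [PySem.Dict.keys, PySem.Dict.empty])
  have hBnodup : Bs.Nodup := nodup_set_fold _ _ (PySem.Set.nodup_ofList _)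
  have hmem : ∀ x, x ∈ A_keys ↔ x ∈ Bs := by
    intro x
    rw [hA, hB, mem_keys_nodeset_fold, mem_set_fold, PySem.Set.mem_ofList]
    simp only [PySem.Dict.keys_empty, List.not_mem_nil, false_or, List.mem_map]
    constructor
    · rintro ⟨p, hp, rfl | hx⟩
      · exact Or.inl ⟨p, hp, rfl⟩
      · exact Or.inr ⟨p, hp, hx⟩
    · rintro (⟨p, hp, rfl⟩ | ⟨p, hp, hx⟩)
      · exact ⟨p, hp, Or.inl rfl⟩
      · exact ⟨p, hp, Or.inr hx⟩
  have hperm : A_keys.Perm Bs := (List.perm_ext_iff_of_nodup hAnodup hBnodup).mpr hmem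
  rw [hperm.countP_eq]
  -- complement: non-sinks counted over Bs equal the nonempty entries of graph
  have hkeys : d.keys = graph.map Prod.fst := PySem.Dict.keys_mk graph
  have hKsub : ∀ x ∈ graph.map Prod.fst, x ∈ Bs := by
    intro x hx; rw [hB, mem_set_fold, PySem.Set.mem_ofList]; exact Or.inl hx
  have hcompl : Bs.countP (fun x => !qA x) = graph.countP (fun p => !p.2.isEmpty) := by
    have h1 : Bs.countP (fun x => !qA x) = (graph.map Prod.fst).countP (fun x => !qA x) := by
      refine countP_eq_of_support hpre' hBnodup hKsub ?_
      intro x hx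
      rw [hqA] at hx
      simp only [Bool.not_or, Bool.and_eq_true, Bool.not_not, Bool.not_eq_eq_eq_not] at hx
      have := hx.1
      rw [PySem.Dict.contains_eq_decide_mem_keys, hkeys] at this
      exact of_decide_eq_true this
    rw [h1, List.countP_map]
    refine List.countP_congr ?_
    intro p hp
    have hc : d.contains p.1 = true := by
      rw [PySem.Dict.contains_eq_decide_mem_keys, hkeys]
      exact decide_eq_true (List.mem_map.mpr ⟨p, hp, rfl⟩)
    have hg : d.getD p.1 [] = p.2 := by
      refine PySem.Dict.getD_of_mem_items d ?_ ?_ []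
      · simpa [hd, PySem.Dict.items] using hp
      · rw [hkeys]; exact hpre'
    simp only [Function.comp, hqA, hc, hg, Bool.not_true, Bool.false_or, Bool.not_eq_eq_eq_not]
    cases p.2 <;> simp
  -- length = sinks + non-sinks
  have hlen : Bs.countP qA + Bs.countP (fun x => !qA x) = Bs.length :=
    countP_add_countP_not_len Bs qA
  rw [hcompl] at hlen
  omega
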